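-- pv_equiv track=rewrite | github.com/UQ-PAC/predicate-simplifier | main.py | compartmentalise_sentence
-- ===== SOURCE A (Python) =====
-- SYMBOLS = ['&&', '||', '~', '(', ')', '=>']
--
-- def compartmentalise_sentence(sentence: str):
--     """
--     Converts a predicate string into a list of its terms and logical connectives.
--     E.g. 'a && b => a && c' is converted to ['a', '&&', 'b', '=>', 'a', '&&', 'c'].
--     :param sentence: string representing a logical sentence, to be converted.
--     :return: a list of the terms and logical connectives used in the predicate, maintaining order and repetitions.
--     """
--     sentence_components = []
--     sentence = sentence.replace(' ', '')
--     current_term = ''  # gradually builds the names of terms as the sentence is parsed char by char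
--     i = 0
--     while i < len(sentence):
--         for op in SYMBOLS:
--             if sentence[i:min(len(sentence), i + len(op))] == op:  # match operator without reading past the sentence
--                 # operator found; store the term we've built so far if it exists
--                 if current_term:
--                     sentence_components.append(current_term)
--                     current_term = ''
--                 sentence_components.append(op)
--                 i += len(op)
--                 break
--             elif op == SYMBOLS[-1]:
--                 # no operator found; append this char to the term name we're building
--                 current_term += sentence[i]
--                 i += 1
--     if current_term:
--         sentence_components.append(current_term)
--     return sentence_components
-- ===== SOURCE B (Python) =====
-- SYMBOLS = ['&&', '||', '~', '(', ')', '=>']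
--
-- def compartmentalise_sentence(sentence: str):
--     """Wrap every operator occurrence in NUL sentinels (left-to-right, like A's
--     greedy first-char-determined matching), then split on the sentinel: the
--     non-empty pieces are exactly the terms and operators in order."""
--     s = sentence.replace(' ', '')
--     for op in SYMBOLS:
--         s = s.replace(op, '\x00' + op + '\x00')
--     return [t for t in s.split('\x00') if t]
-- ===== Notes on version B (the rewrite author's own statement) =====
-- stated objective: faster
-- what changed: A's index-driven while-loop scanner (inner for-loop over SYMBOLS with slicing, character-by-character term accumulation) is replaced by wrapping every operator occurrence in NUL sentinels via six str.replace passes and then splitting on the sentinel, keeping the non-empty pieces.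
import Mathlib
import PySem

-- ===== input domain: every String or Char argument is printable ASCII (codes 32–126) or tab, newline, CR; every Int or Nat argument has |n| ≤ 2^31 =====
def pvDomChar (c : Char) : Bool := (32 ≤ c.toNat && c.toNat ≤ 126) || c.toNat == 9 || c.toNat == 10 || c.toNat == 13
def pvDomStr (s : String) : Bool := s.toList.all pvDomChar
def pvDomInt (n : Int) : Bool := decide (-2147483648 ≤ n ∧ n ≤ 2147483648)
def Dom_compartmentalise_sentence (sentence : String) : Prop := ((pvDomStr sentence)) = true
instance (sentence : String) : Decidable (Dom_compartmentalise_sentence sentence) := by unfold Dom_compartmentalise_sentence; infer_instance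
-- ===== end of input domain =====

set_option maxRecDepth 8192


-- B replaces A's index-driven char-by-char scanner by wrap-operators-in-sentinels-then-split (same output, different algorithm); equivalence of the return values is proved on Dom.

-- ===== PORT A =====
def pvSYMBOLS : List String := ["&&", "||", "~", "(", ")", "=>"]

-- the inner `for op in SYMBOLS` loop body at position i: returns (sentence_components, current_term, i) as left by the loop
def pvForOps (s : List Char) (i : Nat) (comps : List String) (cur : List Char) :
    List String → List String × List Char × Nat
  | [] => (comps, cur, i)
  | op :: rest =>
      if PySem.List.slice s (some (i : Int)) (some ((min s.length (i + op.toList.length) : Nat) : Int)) = op.toList then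
        ((if cur ≠ [] then comps ++ [String.ofList cur] else comps) ++ [op], ([] : List Char), i + op.toList.length)
      else if some op = PySem.List.pyGet? pvSYMBOLS (-1) then
        (comps, cur ++ [PySem.List.pyGetD s (i : Int) ' '], i + 1)
      else pvForOps s i comps cur rest

-- termination fact for the while loop: the for-loop body always advances i
theorem pvForOps_lt (s : List Char) (i : Nat) (comps : List String) (cur : List Char) :
    ∀ ops : List String, "=>" ∈ ops → (∀ op ∈ ops, op ≠ "") →
      i < (pvForOps s i comps cur ops).2.2 := by
  intro ops hmem hne
  induction ops with
  | nil => cases hmem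
  | cons op rest ih =>
    simp only [pvForOps]
    split
    · have : op ≠ "" := hne op (by simp)
      have : op.toList ≠ [] := by simpa using this
      have : 0 < op.toList.length := List.length_pos_iff.mpr this
      exact Nat.lt_add_of_pos_right this
    · split
      · exact Nat.lt_succ_self i
      · rename_i h1 h2
        apply ih
        · rcases List.mem_cons.mp hmem with h | h
          · exfalso; apply h2; rw [← h]; decide
          · exact h
        · intro o ho; exact hne o (List.mem_cons_of_mem _ ho)

def pvALoop (s : List Char) (i : Nat) (comps : List String) (cur : List Char) : List String :=
  if h : i < s.length then
    let r := pvForOps s i comps cur pvSYMBOLS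
    pvALoop s r.2.2 r.1 r.2.1
  else if cur ≠ [] then comps ++ [String.ofList cur] else comps
termination_by s.length - i
decreasing_by
  have := pvForOps_lt s i comps cur pvSYMBOLS (by decide) (by decide)
  omega

def compartmentalise_sentence (sentence : String) : List String :=
  pvALoop (PySem.Str.replace sentence " " "").toList 0 [] []

-- ===== PORT B =====
def compartmentalise_sentence_alt (sentence : String) : List String :=
  let s := (PySem.Str.replace sentence " " "").toList
  let s := pvSYMBOLS.foldl (fun t op => PySem.Chars.replace t op.toList ('\x00' :: (op.toList ++ ['\x00']))) s
  ((PySem.Chars.splitOn s ['\x00']).filter (· ≠ [])).map String.ofList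

-- ===== PRECONDITION & SPEC =====
def Spec_compartmentalise_sentence (sentence : String) (out : List String) : Prop := out = compartmentalise_sentence_alt sentence
instance (sentence : String) (out : List String) : Decidable (Spec_compartmentalise_sentence sentence out) := by unfold Spec_compartmentalise_sentence; infer_instance

-- ===== CLAIM (what is proved, stated in full; the proofs are below) =====
def Claim_equal_compartmentalise_sentence : Prop := ∀ (sentence : String), Dom_compartmentalise_sentence sentence → Spec_compartmentalise_sentence sentence (compartmentalise_sentence sentence)

-- ===== LEMMAS AND PROOFS =====

-- structural model of Python's str.replace (PySem.Chars.replace) for a non-empty pattern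
def pvRep (p q : List Char) : List Char → List Char
  | [] => []
  | c :: t =>
    match p with
    | [] => c :: t
    | a :: p' =>
      if (a :: p').isPrefixOf (c :: t) then q ++ pvRep p q (t.drop p'.length)
      else c :: pvRep p q t
termination_by l => l.length
decreasing_by
  all_goals (simp; try omega)

theorem pvRep_nil (p q : List Char) : pvRep p q [] = [] := by rw [pvRep]

theorem pvRep_go (p q : List Char) (hp : p ≠ []) :
    ∀ fuel l acc, l.length ≤ fuel →
      PySem.Chars.replace.go p q fuel l acc = acc.reverse ++ pvRep p q l := by
  intro fuel
  induction fuel with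
  | zero =>
    intro l acc h
    have hl : l = [] := by cases l <;> simp_all
    subst hl
    simp [PySem.Chars.replace.go, pvRep_nil]
  | succ n ih =>
    intro l acc h
    cases l with
    | nil => simp [PySem.Chars.replace.go, pvRep_nil]
    | cons c t =>
      obtain ⟨a, p', rfl⟩ : ∃ a p', p = a :: p' := by
        cases p
        · exact absurd rfl hp
        · exact ⟨_, _, rfl⟩
      rw [PySem.Chars.replace.go]
      by_cases hpre : (a :: p').isPrefixOf (c :: t)
      · rw [if_pos hpre, ih _ _ (by simp at h ⊢; omega)]
        rw [pvRep, if_pos hpre]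
        simp
      · rw [if_neg hpre, ih _ _ (by simp at h ⊢; omega)]
        rw [pvRep, if_neg hpre]
        simp

theorem replace_eq_pvRep (s p q : List Char) (hp : p ≠ []) :
    PySem.Chars.replace s p q = pvRep p q s := by
  rw [PySem.Chars.replace, if_neg (by simpa using hp)]
  simpa using pvRep_go p q hp s.length s [] le_rfl


theorem pvRep_pos (p q r : List Char) (hp : p ≠ []) :
    pvRep p q (p ++ r) = q ++ pvRep p q r := by
  obtain ⟨a, p', rfl⟩ : ∃ a p', p = a :: p' := by
    cases p
    · exact absurd rfl hp
    · exact ⟨_, _, rfl⟩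
  rw [List.cons_append, pvRep, if_pos (by simp [List.isPrefixOf_iff_prefix])]
  simp

theorem pvRep_neg (p q : List Char) (c : Char) (t : List Char)
    (h : ¬ p.isPrefixOf (c :: t)) : pvRep p q (c :: t) = c :: pvRep p q t := by
  cases p with
  | nil => exact absurd (by simp [List.isPrefixOf_iff_prefix]) h
  | cons a p' => rw [pvRep, if_neg h]

-- peel a block whose characters all differ from the pattern's first character
theorem pvRep_peel (a : Char) (p' q : List Char) (w y : List Char)
    (h : ∀ x ∈ w, x ≠ a) :
    pvRep (a :: p') q (w ++ y) = w ++ pvRep (a :: p') q y := by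
  induction w with
  | nil => simp
  | cons x w' ih =>
    rw [List.cons_append, pvRep_neg _ _ _ _ (by
      simp [List.isPrefixOf_iff_prefix]
      intro hpre
      exact absurd hpre.symm (h x (by simp)))]
    rw [ih (fun x hx => h x (List.mem_cons_of_mem _ hx))]
    simp

-- a replacement whose text starts with NUL maps cons to cons with head NUL or the old head
theorem pvRep_cons_shape (p : List Char) (q0 : Char) (qr : List Char) (c : Char) (t : List Char) :
    ∃ h t', pvRep p (q0 :: qr) (c :: t) = h :: t' ∧ (h = q0 ∨ h = c) := by
  cases p with
  | nil => exact ⟨c, t, by rw [pvRep], Or.inr rfl⟩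
  | cons a p' =>
    by_cases hpre : (a :: p').isPrefixOf (c :: t)
    · refine ⟨q0, qr ++ pvRep (a :: p') (q0 :: qr) (t.drop p'.length), ?_, Or.inl rfl⟩
      rw [pvRep, if_pos hpre]; simp
    · exact ⟨c, pvRep (a :: p') (q0 :: qr) t, by rw [pvRep, if_neg hpre], Or.inr rfl⟩

theorem pvRep_space_mem (l : List Char) (c : Char) (h : c ∈ pvRep [' '] [] l) : c ∈ l := by
  induction l with
  | nil => simpa [pvRep_nil] using h
  | cons x t ih =>
    by_cases hpre : ([' '] : List Char).isPrefixOf (x :: t)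
    · rw [pvRep, if_pos hpre] at h
      simp at h
      exact List.mem_cons_of_mem _ (ih h)
    · rw [pvRep_neg _ _ _ _ hpre] at h
      rcases List.mem_cons.mp h with h | h
      · exact h ▸ List.mem_cons_self
      · exact List.mem_cons_of_mem _ (ih h)

-- structural model of str.split(sep) for the one-character separator NUL
def pvSpl : List Char → List (List Char)
  | [] => [[]]
  | c :: r =>
    if c = '\x00' then [] :: pvSpl r
    else match pvSpl r with
      | [] => [[c]]
      | seg :: ss => (c :: seg) :: ss

def pvMapHead (f : List Char → List Char) : List (List Char) → List (List Char)
  | [] => []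
  | x :: xs => f x :: xs

theorem pvSpl_ne_nil (l : List Char) : pvSpl l ≠ [] := by
  cases l with
  | nil => simp [pvSpl]
  | cons c r =>
    rw [pvSpl]
    split
    · simp
    · split <;> simp

theorem pvSpl_go (fuel : Nat) (l cur : List Char) (acc : List (List Char))
    (h : l.length < fuel) :
    PySem.Chars.splitOn.go ['\x00'] fuel l cur acc
      = acc.reverse ++ pvMapHead (fun seg => cur.reverse ++ seg) (pvSpl l) := by
  induction fuel generalizing l cur acc with
  | zero => exact absurd h (by omega)
  | succ n ih =>
    cases l with
    | nil => rw [PySem.Chars.splitOn.go] <;> simp [pvSpl, pvMapHead]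
    | cons c r =>
      rw [PySem.Chars.splitOn.go]
      obtain ⟨seg, ss, hX⟩ := List.exists_cons_of_ne_nil (pvSpl_ne_nil r)
      by_cases hc : c = '\x00'
      · rw [if_pos (by simp [List.isPrefixOf_iff_prefix, hc])]
        rw [show (['\x00'] : List Char).length = 1 from rfl, List.drop_one, List.tail_cons]
        rw [ih _ _ _ (by simp at h ⊢; omega)]
        rw [pvSpl, if_pos hc, hX]
        simp [pvMapHead]
      · rw [if_neg (by simp [List.isPrefixOf_iff_prefix]; exact fun hb => absurd hb.symm hc)]
        rw [ih _ _ _ (by simp at h ⊢; omega)]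
        rw [pvSpl, if_neg hc, hX]
        simp [pvMapHead]

theorem splitOn_eq_pvSpl (s : List Char) : PySem.Chars.splitOn s ['\x00'] = pvSpl s := by
  obtain ⟨seg, ss, hX⟩ := List.exists_cons_of_ne_nil (pvSpl_ne_nil s)
  rw [PySem.Chars.splitOn, pvSpl_go _ _ _ _ (by omega), hX]
  simp [pvMapHead]

theorem pvSpl_no_nul (x : List Char) (h : '\x00' ∉ x) : pvSpl x = [x] := by
  induction x with
  | nil => rfl
  | cons c x' ih =>
    rw [pvSpl, if_neg (by simp at h; exact fun hc => h.1 hc.symm)]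
    rw [ih (by simp at h; exact h.2)]

theorem pvSpl_append_nul (x y : List Char) (h : '\x00' ∉ x) :
    pvSpl (x ++ '\x00' :: y) = x :: pvSpl y := by
  induction x with
  | nil => rw [List.nil_append, pvSpl, if_pos rfl]
  | cons c x' ih =>
    rw [List.cons_append, pvSpl, if_neg (by simp at h; exact fun hc => h.1 hc.symm)]
    rw [ih (by simp at h; exact h.2)]

-- the six sentinel-wrapping replacements of B, in composed structural form
def pvR' (t : List Char) : List Char :=
  pvRep ['=','>'] ['\x00','=','>','\x00'] (pvRep [')'] ['\x00',')','\x00']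
    (pvRep ['('] ['\x00','(','\x00'] (pvRep ['~'] ['\x00','~','\x00']
      (pvRep ['|','|'] ['\x00','|','|','\x00'] (pvRep ['&','&'] ['\x00','&','&','\x00'] t)))))

theorem pvR_eq_pvR' (t : List Char) :
    pvSYMBOLS.foldl (fun t op => PySem.Chars.replace t op.toList ('\x00' :: (op.toList ++ ['\x00']))) t = pvR' t := by
  have h1 : ("&&" : String).toList = ['&','&'] := by decide
  have h2 : ("||" : String).toList = ['|','|'] := by decide
  have h3 : ("~" : String).toList = ['~'] := by decide
  have h4 : ("(" : String).toList = ['('] := by decide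
  have h5 : (")" : String).toList = [')'] := by decide
  have h6 : ("=>" : String).toList = ['=','>'] := by decide
  simp only [pvSYMBOLS, List.foldl_cons, List.foldl_nil, h1, h2, h3, h4, h5, h6]
  rw [replace_eq_pvRep _ _ _ (by simp), replace_eq_pvRep _ _ _ (by simp),
      replace_eq_pvRep _ _ _ (by simp), replace_eq_pvRep _ _ _ (by simp),
      replace_eq_pvRep _ _ _ (by simp), replace_eq_pvRep _ _ _ (by simp)]
  unfold pvR'
  simp only [List.cons_append, List.nil_append]

theorem pvPre1 (a c : Char) (t : List Char) :
    ([a] : List Char).isPrefixOf (c :: t) ↔ c = a := by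
  rw [List.isPrefixOf_iff_prefix, List.cons_prefix_cons]
  simp [eq_comm]

theorem pvPre2 (a b c : Char) (t : List Char) :
    ([a, b] : List Char).isPrefixOf (c :: t) ↔ (c = a ∧ t.head? = some b) := by
  rw [List.isPrefixOf_iff_prefix, List.cons_prefix_cons]
  cases t <;> simp [List.cons_prefix_cons, eq_comm]

theorem pvR'_nil : pvR' [] = [] := by simp [pvR', pvRep_nil]

theorem pvR'_amp (r : List Char) :
    pvR' ('&' :: '&' :: r) = '\x00' :: '&' :: '&' :: '\x00' :: pvR' r := by
  unfold pvR'
  rw [show ('&' :: '&' :: r) = ['&','&'] ++ r from rfl, pvRep_pos _ _ _ (by simp)]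
  rw [pvRep_peel '|' ['|'] ['\x00','|','|','\x00'] ['\x00','&','&','\x00'] _ (by simp)]
  rw [pvRep_peel '~' [] ['\x00','~','\x00'] ['\x00','&','&','\x00'] _ (by simp)]
  rw [pvRep_peel '(' [] ['\x00','(','\x00'] ['\x00','&','&','\x00'] _ (by simp)]
  rw [pvRep_peel ')' [] ['\x00',')','\x00'] ['\x00','&','&','\x00'] _ (by simp)]
  rw [pvRep_peel '=' ['>'] ['\x00','=','>','\x00'] ['\x00','&','&','\x00'] _ (by simp)]
  simp only [List.cons_append, List.nil_append]

theorem pvR'_bar (r : List Char) :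
    pvR' ('|' :: '|' :: r) = '\x00' :: '|' :: '|' :: '\x00' :: pvR' r := by
  unfold pvR'
  rw [show ('|' :: '|' :: r) = ['|','|'] ++ r from rfl]
  rw [pvRep_peel '&' ['&'] ['\x00','&','&','\x00'] ['|','|'] _ (by simp)]
  rw [pvRep_pos ['|','|'] _ _ (by simp)]
  rw [pvRep_peel '~' [] ['\x00','~','\x00'] ['\x00','|','|','\x00'] _ (by simp)]
  rw [pvRep_peel '(' [] ['\x00','(','\x00'] ['\x00','|','|','\x00'] _ (by simp)]
  rw [pvRep_peel ')' [] ['\x00',')','\x00'] ['\x00','|','|','\x00'] _ (by simp)]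
  rw [pvRep_peel '=' ['>'] ['\x00','=','>','\x00'] ['\x00','|','|','\x00'] _ (by simp)]
  simp only [List.cons_append, List.nil_append]

theorem pvR'_tilde (r : List Char) :
    pvR' ('~' :: r) = '\x00' :: '~' :: '\x00' :: pvR' r := by
  unfold pvR'
  rw [show ('~' :: r) = ['~'] ++ r from rfl]
  rw [pvRep_peel '&' ['&'] ['\x00','&','&','\x00'] ['~'] _ (by simp)]
  rw [pvRep_peel '|' ['|'] ['\x00','|','|','\x00'] ['~'] _ (by simp)]
  rw [pvRep_pos ['~'] _ _ (by simp)]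
  rw [pvRep_peel '(' [] ['\x00','(','\x00'] ['\x00','~','\x00'] _ (by simp)]
  rw [pvRep_peel ')' [] ['\x00',')','\x00'] ['\x00','~','\x00'] _ (by simp)]
  rw [pvRep_peel '=' ['>'] ['\x00','=','>','\x00'] ['\x00','~','\x00'] _ (by simp)]
  simp only [List.cons_append, List.nil_append]

theorem pvR'_lpar (r : List Char) :
    pvR' ('(' :: r) = '\x00' :: '(' :: '\x00' :: pvR' r := by
  unfold pvR'
  rw [show ('(' :: r) = ['('] ++ r from rfl]
  rw [pvRep_peel '&' ['&'] ['\x00','&','&','\x00'] ['('] _ (by simp)]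
  rw [pvRep_peel '|' ['|'] ['\x00','|','|','\x00'] ['('] _ (by simp)]
  rw [pvRep_peel '~' [] ['\x00','~','\x00'] ['('] _ (by simp)]
  rw [pvRep_pos ['('] _ _ (by simp)]
  rw [pvRep_peel ')' [] ['\x00',')','\x00'] ['\x00','(','\x00'] _ (by simp)]
  rw [pvRep_peel '=' ['>'] ['\x00','=','>','\x00'] ['\x00','(','\x00'] _ (by simp)]
  simp only [List.cons_append, List.nil_append]

theorem pvR'_rpar (r : List Char) :
    pvR' (')' :: r) = '\x00' :: ')' :: '\x00' :: pvR' r := by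
  unfold pvR'
  rw [show (')' :: r) = [')'] ++ r from rfl]
  rw [pvRep_peel '&' ['&'] ['\x00','&','&','\x00'] [')'] _ (by simp)]
  rw [pvRep_peel '|' ['|'] ['\x00','|','|','\x00'] [')'] _ (by simp)]
  rw [pvRep_peel '~' [] ['\x00','~','\x00'] [')'] _ (by simp)]
  rw [pvRep_peel '(' [] ['\x00','(','\x00'] [')'] _ (by simp)]
  rw [pvRep_pos [')'] _ _ (by simp)]
  rw [pvRep_peel '=' ['>'] ['\x00','=','>','\x00'] ['\x00',')','\x00'] _ (by simp)]
  simp only [List.cons_append, List.nil_append]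

theorem pvR'_imp (r : List Char) :
    pvR' ('=' :: '>' :: r) = '\x00' :: '=' :: '>' :: '\x00' :: pvR' r := by
  unfold pvR'
  rw [show ('=' :: '>' :: r) = ['=','>'] ++ r from rfl]
  rw [pvRep_peel '&' ['&'] ['\x00','&','&','\x00'] ['=','>'] _ (by simp)]
  rw [pvRep_peel '|' ['|'] ['\x00','|','|','\x00'] ['=','>'] _ (by simp)]
  rw [pvRep_peel '~' [] ['\x00','~','\x00'] ['=','>'] _ (by simp)]
  rw [pvRep_peel '(' [] ['\x00','(','\x00'] ['=','>'] _ (by simp)]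
  rw [pvRep_peel ')' [] ['\x00',')','\x00'] ['=','>'] _ (by simp)]
  rw [pvRep_pos ['=','>'] _ _ (by simp)]
  simp only [List.cons_append, List.nil_append]

theorem pvR'_char (c : Char) (t : List Char)
    (h1 : ¬(c = '&' ∧ t.head? = some '&')) (h2 : ¬(c = '|' ∧ t.head? = some '|'))
    (h3 : ¬(c = '=' ∧ t.head? = some '>'))
    (h4 : c ≠ '~') (h5 : c ≠ '(') (h6 : c ≠ ')') :
    pvR' (c :: t) = c :: pvR' t := by
  unfold pvR'
  rw [pvRep_neg _ _ _ _ (by rw [pvPre2]; exact h1)]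
  cases t with
  | nil =>
    rw [pvRep_nil]
    rw [pvRep_neg _ _ _ _ (by rw [pvPre2]; simp)]
    rw [pvRep_nil]
    rw [pvRep_neg _ _ _ _ (by rw [pvPre1]; exact h4), pvRep_nil]
    rw [pvRep_neg _ _ _ _ (by rw [pvPre1]; exact h5), pvRep_nil]
    rw [pvRep_neg _ _ _ _ (by rw [pvPre1]; exact h6), pvRep_nil]
    rw [pvRep_neg _ _ _ _ (by rw [pvPre2]; simp), pvRep_nil]
  | cons d t' =>
    obtain ⟨e1, r1, hX1, hd1⟩ := pvRep_cons_shape ['&','&'] '\x00' ['&','&','\x00'] d t'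
    rw [hX1]
    rw [pvRep_neg _ _ _ _ (by
      rw [pvPre2]
      rintro ⟨hc, hh⟩
      simp at hh
      rcases hd1 with he | he
      · rw [he] at hh; exact absurd hh (by decide)
      · exact h2 ⟨hc, by rw [he] at hh; simp [hh]⟩)]
    obtain ⟨e2, r2, hX2, hd2⟩ := pvRep_cons_shape ['|','|'] '\x00' ['|','|','\x00'] e1 r1
    rw [hX2]
    rw [pvRep_neg _ _ _ _ (by rw [pvPre1]; exact h4)]
    obtain ⟨e3, r3, hX3, hd3⟩ := pvRep_cons_shape ['~'] '\x00' ['~','\x00'] e2 r2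
    rw [hX3]
    rw [pvRep_neg _ _ _ _ (by rw [pvPre1]; exact h5)]
    obtain ⟨e4, r4, hX4, hd4⟩ := pvRep_cons_shape ['('] '\x00' ['(','\x00'] e3 r3
    rw [hX4]
    rw [pvRep_neg _ _ _ _ (by rw [pvPre1]; exact h6)]
    obtain ⟨e5, r5, hX5, hd5⟩ := pvRep_cons_shape [')'] '\x00' [')','\x00'] e4 r4
    rw [hX5]
    rw [pvRep_neg _ _ _ _ (by
      rw [pvPre2]
      rintro ⟨hc, hh⟩
      simp at hh
      have he5 : e5 = '\x00' ∨ e5 = d := by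
        rcases hd5 with h' | h'
        · exact Or.inl h'
        · rw [h']
          rcases hd4 with h' | h'
          · exact Or.inl h'
          · rw [h']
            rcases hd3 with h' | h'
            · exact Or.inl h'
            · rw [h']
              rcases hd2 with h' | h'
              · exact Or.inl h'
              · rw [h']; exact hd1
      rcases he5 with he | he
      · rw [he] at hh; exact absurd hh (by decide)
      · exact h3 ⟨hc, by rw [he] at hh; simp [hh]⟩)]

-- the common tokenization both programs compute: scan with the current term accumulated
def pvScan : List Char → List Char → List (List Char)
  | cur, [] => if cur = [] then [] else [cur]
  | cur, c :: t =>
    if c = '&' ∧ t.head? = some '&' then (if cur = [] then [] else [cur]) ++ ['&','&'] :: pvScan [] t.tail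
    else if c = '|' ∧ t.head? = some '|' then (if cur = [] then [] else [cur]) ++ ['|','|'] :: pvScan [] t.tail
    else if c = '=' ∧ t.head? = some '>' then (if cur = [] then [] else [cur]) ++ ['=','>'] :: pvScan [] t.tail
    else if c = '~' then (if cur = [] then [] else [cur]) ++ ['~'] :: pvScan [] t
    else if c = '(' then (if cur = [] then [] else [cur]) ++ ['('] :: pvScan [] t
    else if c = ')' then (if cur = [] then [] else [cur]) ++ [')'] :: pvScan [] t
    else pvScan (cur ++ [c]) t
termination_by _ l => l.length
decreasing_by all_goals (simp [List.length_tail]; try omega)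


theorem pvSlice (s : List Char) (i k : Nat) :
    PySem.List.slice s (some (i : Int)) (some ((min s.length (i + k) : Nat) : Int)) = (s.drop i).take k := by
  rw [PySem.List.slice_natCast, List.take_eq_take_iff]
  simp; omega

theorem pvLast : PySem.List.pyGet? (["&&", "||", "~", "(", ")", "=>"] : List String) (-1) = some "=>" := by decide

theorem pvNe1 : ("&&" : String) ≠ "=>" := by decide
theorem pvNe2 : ("||" : String) ≠ "=>" := by decide
theorem pvNe3 : ("~" : String) ≠ "=>" := by decide
theorem pvNe4 : ("(" : String) ≠ "=>" := by decide
theorem pvNe5 : (")" : String) ≠ "=>" := by decide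

theorem pvFor_amp (s : List Char) (i : Nat) (comps : List String) (cur : List Char) (r : List Char)
    (hd : s.drop i = '&' :: '&' :: r) :
    pvForOps s i comps cur pvSYMBOLS
      = ((if cur ≠ [] then comps ++ [String.ofList cur] else comps) ++ ["&&"], [], i + 2) := by
  have e1 : ("&&" : String).toList = ['&','&'] := by decide
  simp only [pvSYMBOLS, pvForOps]
  simp only [pvSlice]
  simp [hd, e1]

theorem pvFor_bar (s : List Char) (i : Nat) (comps : List String) (cur : List Char) (r : List Char)
    (hd : s.drop i = '|' :: '|' :: r) :
    pvForOps s i comps cur pvSYMBOLS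
      = ((if cur ≠ [] then comps ++ [String.ofList cur] else comps) ++ ["||"], [], i + 2) := by
  have e1 : ("&&" : String).toList = ['&','&'] := by decide
  have e2 : ("||" : String).toList = ['|','|'] := by decide
  simp only [pvSYMBOLS, pvForOps]
  simp only [pvSlice]
  simp [hd, e1, e2, pvLast, pvNe1, pvNe2, pvNe3, pvNe4, pvNe5]

theorem pvFor_tilde (s : List Char) (i : Nat) (comps : List String) (cur : List Char) (r : List Char)
    (hd : s.drop i = '~' :: r) :
    pvForOps s i comps cur pvSYMBOLS
      = ((if cur ≠ [] then comps ++ [String.ofList cur] else comps) ++ ["~"], [], i + 1) := by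
  have e1 : ("&&" : String).toList = ['&','&'] := by decide
  have e2 : ("||" : String).toList = ['|','|'] := by decide
  have e3 : ("~" : String).toList = ['~'] := by decide
  simp only [pvSYMBOLS, pvForOps]
  simp only [pvSlice]
  cases r <;> simp [hd, e1, e2, e3, pvLast, pvNe1, pvNe2, pvNe3, pvNe4, pvNe5]

theorem pvFor_lpar (s : List Char) (i : Nat) (comps : List String) (cur : List Char) (r : List Char)
    (hd : s.drop i = '(' :: r) :
    pvForOps s i comps cur pvSYMBOLS
      = ((if cur ≠ [] then comps ++ [String.ofList cur] else comps) ++ ["("], [], i + 1) := by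
  have e1 : ("&&" : String).toList = ['&','&'] := by decide
  have e2 : ("||" : String).toList = ['|','|'] := by decide
  have e3 : ("~" : String).toList = ['~'] := by decide
  have e4 : ("(" : String).toList = ['('] := by decide
  simp only [pvSYMBOLS, pvForOps]
  simp only [pvSlice]
  cases r <;> simp [hd, e1, e2, e3, e4, pvLast, pvNe1, pvNe2, pvNe3, pvNe4, pvNe5]

theorem pvFor_rpar (s : List Char) (i : Nat) (comps : List String) (cur : List Char) (r : List Char)
    (hd : s.drop i = ')' :: r) :
    pvForOps s i comps cur pvSYMBOLS
      = ((if cur ≠ [] then comps ++ [String.ofList cur] else comps) ++ [")"], [], i + 1) := by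
  have e1 : ("&&" : String).toList = ['&','&'] := by decide
  have e2 : ("||" : String).toList = ['|','|'] := by decide
  have e3 : ("~" : String).toList = ['~'] := by decide
  have e4 : ("(" : String).toList = ['('] := by decide
  have e5 : (")" : String).toList = [')'] := by decide
  simp only [pvSYMBOLS, pvForOps]
  simp only [pvSlice]
  cases r <;> simp [hd, e1, e2, e3, e4, e5, pvLast, pvNe1, pvNe2, pvNe3, pvNe4, pvNe5]

theorem pvFor_imp (s : List Char) (i : Nat) (comps : List String) (cur : List Char) (r : List Char)
    (hd : s.drop i = '=' :: '>' :: r) :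
    pvForOps s i comps cur pvSYMBOLS
      = ((if cur ≠ [] then comps ++ [String.ofList cur] else comps) ++ ["=>"], [], i + 2) := by
  have e1 : ("&&" : String).toList = ['&','&'] := by decide
  have e2 : ("||" : String).toList = ['|','|'] := by decide
  have e3 : ("~" : String).toList = ['~'] := by decide
  have e4 : ("(" : String).toList = ['('] := by decide
  have e5 : (")" : String).toList = [')'] := by decide
  have e6 : ("=>" : String).toList = ['=','>'] := by decide
  simp only [pvSYMBOLS, pvForOps]
  simp only [pvSlice]
  simp [hd, e1, e2, e3, e4, e5, e6, pvLast, pvNe1, pvNe2, pvNe3, pvNe4, pvNe5]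

theorem pvFor_char (s : List Char) (i : Nat) (comps : List String) (cur : List Char) (c : Char) (r : List Char)
    (hd : s.drop i = c :: r)
    (h1 : ¬(c = '&' ∧ r.head? = some '&')) (h2 : ¬(c = '|' ∧ r.head? = some '|'))
    (h3 : ¬(c = '=' ∧ r.head? = some '>'))
    (h4 : c ≠ '~') (h5 : c ≠ '(') (h6 : c ≠ ')') :
    pvForOps s i comps cur pvSYMBOLS = (comps, cur ++ [c], i + 1) := by
  have e1 : ("&&" : String).toList = ['&','&'] := by decide
  have e2 : ("||" : String).toList = ['|','|'] := by decide
  have e3 : ("~" : String).toList = ['~'] := by decide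
  have e4 : ("(" : String).toList = ['('] := by decide
  have e5 : (")" : String).toList = [')'] := by decide
  have e6 : ("=>" : String).toList = ['=','>'] := by decide
  have hi : i < s.length := by
    by_contra hge
    rw [List.drop_eq_nil_of_le (by omega)] at hd
    simp at hd
  have h0 : s[i]? = some c := by
    have := congrArg (fun l => l[0]?) hd
    simpa [List.getElem?_drop] using this
  have k1 : ¬(c = '&' ∧ List.take 1 r = ['&']) := by
    rintro ⟨hc, ht⟩
    refine h1 ⟨hc, ?_⟩
    cases r with
    | nil => simp at ht
    | cons d r' => simp at ht; simp [ht]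
  have k2 : ¬(c = '|' ∧ List.take 1 r = ['|']) := by
    rintro ⟨hc, ht⟩
    refine h2 ⟨hc, ?_⟩
    cases r with
    | nil => simp at ht
    | cons d r' => simp at ht; simp [ht]
  have k6 : ¬(c = '=' ∧ List.take 1 r = ['>']) := by
    rintro ⟨hc, ht⟩
    refine h3 ⟨hc, ?_⟩
    cases r with
    | nil => simp at ht
    | cons d r' => simp at ht; simp [ht]
  simp only [pvSYMBOLS, pvForOps]
  simp only [pvSlice]
  simp [hd, e1, e2, e3, e4, e5, e6, pvLast, k1, k2, k6, h4, h5, h6, h0]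


theorem pvALoop_step (s : List Char) (i : Nat) (comps : List String) (cur : List Char)
    (h : i < s.length) :
    pvALoop s i comps cur
      = pvALoop s (pvForOps s i comps cur pvSYMBOLS).2.2 (pvForOps s i comps cur pvSYMBOLS).1
          (pvForOps s i comps cur pvSYMBOLS).2.1 := by
  rw [pvALoop]
  rw [dif_pos h]

theorem pvP1 (s : List Char) : ∀ (n i : Nat) (comps : List String) (cur : List Char),
    s.length - i ≤ n →
      pvALoop s i comps cur = comps ++ (pvScan cur (s.drop i)).map String.ofList := by
  intro n
  induction n with
  | zero =>
    intro i comps cur hb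
    rw [pvALoop, dif_neg (by omega), List.drop_eq_nil_of_le (by omega), pvScan]
    by_cases hcur : cur = [] <;> simp [hcur]
  | succ n ih =>
    intro i comps cur hb
    by_cases h : i < s.length
    case neg =>
      rw [pvALoop, dif_neg h, List.drop_eq_nil_of_le (by omega), pvScan]
      by_cases hcur : cur = [] <;> simp [hcur]
    case pos =>
      rcases hd0 : s.drop i with _ | ⟨c, t0⟩
      · exfalso
        have := congrArg List.length hd0
        simp at this
        omega
      by_cases hamp : c = '&' ∧ t0.head? = some '&'
      · obtain ⟨hc, hh⟩ := hamp
        subst hc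
        rcases t0 with _ | ⟨d, r⟩
        · simp at hh
        · simp at hh
          subst hh
          have ho : String.ofList ['&','&'] = "&&" := by decide
          rw [pvALoop_step _ _ _ _ h, pvFor_amp _ _ _ _ _ hd0]
          show pvALoop s (i+2) ((if cur ≠ [] then comps ++ [String.ofList cur] else comps) ++ ["&&"]) [] = _
          rw [pvScan, if_pos (show ('&' : Char) = '&' ∧ ('&' :: r).head? = some '&' from ⟨rfl, rfl⟩)]
          rw [ih _ _ _ (by omega)]
          have hdrop : s.drop (i + 2) = r := by
            have h2 := congrArg (List.drop 2) hd0
            simpa [List.drop_drop, Nat.add_comm] using h2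
          rw [hdrop]
          by_cases hcur : cur = [] <;> simp [hcur, ho]
      by_cases hbar : c = '|' ∧ t0.head? = some '|'
      · obtain ⟨hc, hh⟩ := hbar
        subst hc
        rcases t0 with _ | ⟨d, r⟩
        · simp at hh
        · simp at hh
          subst hh
          have ho : String.ofList ['|','|'] = "||" := by decide
          rw [pvALoop_step _ _ _ _ h, pvFor_bar _ _ _ _ _ hd0]
          show pvALoop s (i+2) ((if cur ≠ [] then comps ++ [String.ofList cur] else comps) ++ ["||"]) [] = _
          rw [pvScan, if_neg (show ¬(('|' : Char) = '&' ∧ ('|' :: r).head? = some '&') from by simp),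
              if_pos (show ('|' : Char) = '|' ∧ ('|' :: r).head? = some '|' from ⟨rfl, rfl⟩)]
          rw [ih _ _ _ (by omega)]
          have hdrop : s.drop (i + 2) = r := by
            have h2 := congrArg (List.drop 2) hd0
            simpa [List.drop_drop, Nat.add_comm] using h2
          rw [hdrop]
          by_cases hcur : cur = [] <;> simp [hcur, ho]
      by_cases himp : c = '=' ∧ t0.head? = some '>'
      · obtain ⟨hc, hh⟩ := himp
        subst hc
        rcases t0 with _ | ⟨d, r⟩
        · simp at hh
        · simp at hh
          subst hh
          have ho : String.ofList ['=','>'] = "=>" := by decide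
          rw [pvALoop_step _ _ _ _ h, pvFor_imp _ _ _ _ _ hd0]
          show pvALoop s (i+2) ((if cur ≠ [] then comps ++ [String.ofList cur] else comps) ++ ["=>"]) [] = _
          rw [pvScan, if_neg (show ¬(('=' : Char) = '&' ∧ ('>' :: r).head? = some '&') from by simp),
              if_neg (show ¬(('=' : Char) = '|' ∧ ('>' :: r).head? = some '|') from by simp),
              if_pos (show ('=' : Char) = '=' ∧ ('>' :: r).head? = some '>' from ⟨rfl, rfl⟩)]
          rw [ih _ _ _ (by omega)]
          have hdrop : s.drop (i + 2) = r := by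
            have h2 := congrArg (List.drop 2) hd0
            simpa [List.drop_drop, Nat.add_comm] using h2
          rw [hdrop]
          by_cases hcur : cur = [] <;> simp [hcur, ho]
      by_cases htl : c = '~'
      · subst htl
        have ho : String.ofList ['~'] = "~" := by decide
        rw [pvALoop_step _ _ _ _ h, pvFor_tilde _ _ _ _ _ hd0]
        show pvALoop s (i+1) ((if cur ≠ [] then comps ++ [String.ofList cur] else comps) ++ ["~"]) [] = _
        rw [pvScan, if_neg hamp, if_neg hbar, if_neg himp, if_pos (show ('~' : Char) = '~' from rfl)]
        rw [ih _ _ _ (by omega)]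
        have hdrop : s.drop (i + 1) = t0 := by
          have h2 := congrArg (List.drop 1) hd0
          simpa [List.drop_drop, Nat.add_comm] using h2
        rw [hdrop]
        by_cases hcur : cur = [] <;> simp [hcur, ho]
      by_cases hlp : c = '('
      · subst hlp
        have ho : String.ofList ['('] = "(" := by decide
        rw [pvALoop_step _ _ _ _ h, pvFor_lpar _ _ _ _ _ hd0]
        show pvALoop s (i+1) ((if cur ≠ [] then comps ++ [String.ofList cur] else comps) ++ ["("]) [] = _
        rw [pvScan, if_neg hamp, if_neg hbar, if_neg himp, if_neg htl, if_pos (show ('(' : Char) = '(' from rfl)]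
        rw [ih _ _ _ (by omega)]
        have hdrop : s.drop (i + 1) = t0 := by
          have h2 := congrArg (List.drop 1) hd0
          simpa [List.drop_drop, Nat.add_comm] using h2
        rw [hdrop]
        by_cases hcur : cur = [] <;> simp [hcur, ho]
      by_cases hrp : c = ')'
      · subst hrp
        have ho : String.ofList [')'] = ")" := by decide
        rw [pvALoop_step _ _ _ _ h, pvFor_rpar _ _ _ _ _ hd0]
        show pvALoop s (i+1) ((if cur ≠ [] then comps ++ [String.ofList cur] else comps) ++ [")"]) [] = _
        rw [pvScan, if_neg hamp, if_neg hbar, if_neg himp, if_neg htl, if_neg hlp, if_pos (show (')' : Char) = ')' from rfl)]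
        rw [ih _ _ _ (by omega)]
        have hdrop : s.drop (i + 1) = t0 := by
          have h2 := congrArg (List.drop 1) hd0
          simpa [List.drop_drop, Nat.add_comm] using h2
        rw [hdrop]
        by_cases hcur : cur = [] <;> simp [hcur, ho]
      · rw [pvALoop_step _ _ _ _ h, pvFor_char _ _ _ _ _ _ hd0 hamp hbar himp htl hlp hrp]
        show pvALoop s (i+1) comps (cur ++ [c]) = _
        rw [pvScan, if_neg hamp, if_neg hbar, if_neg himp, if_neg htl, if_neg hlp, if_neg hrp]
        rw [ih _ _ _ (by omega)]
        have hdrop : s.drop (i + 1) = t0 := by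
          have h2 := congrArg (List.drop 1) hd0
          simpa [List.drop_drop, Nat.add_comm] using h2
        rw [hdrop]


theorem pvP2 (cur l : List Char) :
    '\x00' ∉ l → '\x00' ∉ cur →
      (pvSpl (cur ++ pvR' l)).filter (· ≠ []) = pvScan cur l := by
  induction cur, l using pvScan.induct with
  | case1 =>
    intro _ _
    rw [pvR'_nil, List.append_nil, pvSpl_no_nul [] (by simp), pvScan]
    simp
  | case2 cur hne =>
    intro _ hcur
    rw [pvR'_nil, List.append_nil, pvSpl_no_nul cur hcur, pvScan]
    simp [hne]
  | case3 cur c t h ih =>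
    obtain ⟨hc, hh⟩ := h
    subst hc
    rcases t with _ | ⟨d, tt⟩
    · simp at hh
    · simp at hh
      subst hh
      intro hl hcur
      rw [pvR'_amp]
      rw [show cur ++ ('\x00' :: '&' :: '&' :: '\x00' :: pvR' tt)
            = cur ++ '\x00' :: (['&','&'] ++ '\x00' :: pvR' tt) from by simp]
      rw [pvSpl_append_nul _ _ hcur, pvSpl_append_nul _ _ (by simp)]
      have ihr := ih (by simp at hl; tauto) (by simp)
      simp only [List.nil_append, List.tail_cons, ne_eq, decide_not] at ihr
      rw [pvScan, if_pos (show ('&' : Char) = '&' ∧ ('&' :: tt).head? = some '&' from ⟨rfl, rfl⟩)]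
      by_cases h : cur = [] <;> simp [h, ihr]
  | case4 cur c t h1 h ih =>
    obtain ⟨hc, hh⟩ := h
    subst hc
    rcases t with _ | ⟨d, tt⟩
    · simp at hh
    · simp at hh
      subst hh
      intro hl hcur
      rw [pvR'_bar]
      rw [show cur ++ ('\x00' :: '|' :: '|' :: '\x00' :: pvR' tt)
            = cur ++ '\x00' :: (['|','|'] ++ '\x00' :: pvR' tt) from by simp]
      rw [pvSpl_append_nul _ _ hcur, pvSpl_append_nul _ _ (by simp)]
      have ihr := ih (by simp at hl; tauto) (by simp)
      simp only [List.nil_append, List.tail_cons, ne_eq, decide_not] at ihr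
      rw [pvScan, if_neg h1,
          if_pos (show ('|' : Char) = '|' ∧ ('|' :: tt).head? = some '|' from ⟨rfl, rfl⟩)]
      by_cases h : cur = [] <;> simp [h, ihr]
  | case5 cur c t h1 h2 h ih =>
    obtain ⟨hc, hh⟩ := h
    subst hc
    rcases t with _ | ⟨d, tt⟩
    · simp at hh
    · simp at hh
      subst hh
      intro hl hcur
      rw [pvR'_imp]
      rw [show cur ++ ('\x00' :: '=' :: '>' :: '\x00' :: pvR' tt)
            = cur ++ '\x00' :: (['=','>'] ++ '\x00' :: pvR' tt) from by simp]
      rw [pvSpl_append_nul _ _ hcur, pvSpl_append_nul _ _ (by simp)]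
      have ihr := ih (by simp at hl; tauto) (by simp)
      simp only [List.nil_append, List.tail_cons, ne_eq, decide_not] at ihr
      rw [pvScan, if_neg h1, if_neg h2,
          if_pos (show ('=' : Char) = '=' ∧ ('>' :: tt).head? = some '>' from ⟨rfl, rfl⟩)]
      by_cases h : cur = [] <;> simp [h, ihr]
  | case6 cur t h1 h2 h3 ih =>
    intro hl hcur
    rw [pvR'_tilde]
    rw [show cur ++ ('\x00' :: '~' :: '\x00' :: pvR' t)
          = cur ++ '\x00' :: (['~'] ++ '\x00' :: pvR' t) from by simp]
    rw [pvSpl_append_nul _ _ hcur, pvSpl_append_nul _ _ (by simp)]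
    have ihr := ih (by simp at hl; tauto) (by simp)
    simp only [List.nil_append, List.tail_cons, ne_eq, decide_not] at ihr
    rw [pvScan, if_neg h1, if_neg h2, if_neg h3, if_pos (show ('~' : Char) = '~' from rfl)]
    by_cases h : cur = [] <;> simp [h, ihr]
  | case7 cur t h1 h2 h3 h4 ih =>
    intro hl hcur
    rw [pvR'_lpar]
    rw [show cur ++ ('\x00' :: '(' :: '\x00' :: pvR' t)
          = cur ++ '\x00' :: (['('] ++ '\x00' :: pvR' t) from by simp]
    rw [pvSpl_append_nul _ _ hcur, pvSpl_append_nul _ _ (by simp)]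
    have ihr := ih (by simp at hl; tauto) (by simp)
    simp only [List.nil_append, List.tail_cons, ne_eq, decide_not] at ihr
    rw [pvScan, if_neg h1, if_neg h2, if_neg h3, if_neg h4, if_pos (show ('(' : Char) = '(' from rfl)]
    by_cases h : cur = [] <;> simp [h, ihr]
  | case8 cur t h1 h2 h3 h4 h5 ih =>
    intro hl hcur
    rw [pvR'_rpar]
    rw [show cur ++ ('\x00' :: ')' :: '\x00' :: pvR' t)
          = cur ++ '\x00' :: ([')'] ++ '\x00' :: pvR' t) from by simp]
    rw [pvSpl_append_nul _ _ hcur, pvSpl_append_nul _ _ (by simp)]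
    have ihr := ih (by simp at hl; tauto) (by simp)
    simp only [List.nil_append, List.tail_cons, ne_eq, decide_not] at ihr
    rw [pvScan, if_neg h1, if_neg h2, if_neg h3, if_neg h4, if_neg h5, if_pos (show (')' : Char) = ')' from rfl)]
    by_cases h : cur = [] <;> simp [h, ihr]
  | case9 cur c t h1 h2 h3 h4 h5 h6 ih =>
    intro hl hcur
    rw [pvR'_char c t h1 h2 h3 h4 h5 h6]
    rw [show cur ++ (c :: pvR' t) = (cur ++ [c]) ++ pvR' t from by simp]
    have ihr := ih (by simp at hl; tauto) (by
      simp at hl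
      simp [hcur]
      exact fun hc => hl.1 hc)
    rw [pvScan, if_neg h1, if_neg h2, if_neg h3, if_neg h4, if_neg h5, if_neg h6]
    exact ihr

-- ===== VERDICT (by name: the statement is the Claim_ definition above) =====
theorem compartmentalise_sentence_spec : Claim_equal_compartmentalise_sentence := by
  intro sentence hdom
  unfold Spec_compartmentalise_sentence compartmentalise_sentence compartmentalise_sentence_alt
  have hsp : (" " : String).toList = [' '] := by decide
  have hem : ("" : String).toList = [] := by decide
  have hnul : '\x00' ∉ (PySem.Str.replace sentence " " "").toList := by
    rw [PySem.Str.toList_replace, hsp, hem, replace_eq_pvRep _ _ _ (by simp)]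
    intro hm
    have h0 : '\x00' ∈ sentence.toList := pvRep_space_mem _ _ hm
    have hall : ∀ c ∈ sentence.toList, pvDomChar c := by
      unfold Dom_compartmentalise_sentence pvDomStr at hdom
      simpa [List.all_eq_true] using hdom
    exact absurd (hall _ h0) (by decide)
  rw [pvP1 _ ((PySem.Str.replace sentence " " "").toList.length) 0 [] [] (by omega)]
  simp only [List.drop_zero, List.nil_append]
  have h2 := pvP2 [] (PySem.Str.replace sentence " " "").toList hnul (by simp)
  rw [List.nil_append] at h2
  rw [pvR_eq_pvR', splitOn_eq_pvSpl, h2]
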